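-- pv_equiv track=rewrite | github.com/CaseScope/caseScope_2026 | site_docs/ai_search_v4_attack_patterns.py | expand_to_multi_query
-- ===== SOURCE A (Python) =====
-- from typing import List, Dict, Any, Optional, Tuple, Generator, Set
--
-- MULTI_QUERY_TEMPLATES = {
--     'lateral movement': [
--         "remote logon type 3 type 10 network authentication",
--         "psexec wmic winrm remote execution admin$",
--         "4624 4648 network logon explicit credentials",
--         "rdp mstsc 3389 remote desktop connection",
--         "smb share access c$ admin$ ipc$",
--     ],
--     'credential theft': [
--         "lsass mimikatz sekurlsa credential dump",
--         "procdump comsvcs minidump memory",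
--         "sam ntds.dit registry hive export",
--         "kerberoast tgs ticket service principal",
--         "dcsync drsuapi replication domain controller",
--     ],
--     'malware execution': [
--         "powershell encodedcommand bypass hidden",
--         "certutil bitsadmin urlcache decode download",
--         "regsvr32 rundll32 mshta scrobj javascript",
--         "wmic process call create wmiprvse",
--         "cmd /c whoami net user systeminfo",
--     ],
--     'persistence': [
--         "schtasks scheduled task create 4698",
--         "service install sc create 7045",
--         "registry run key autorun startup",
--         "wmi subscription eventfilter consumer",
--     ],
--     'exfiltration': [
--         "curl wget invoke-webrequest upload transfer",
--         "zip rar 7z archive compress staging",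
--         "ftp sftp scp cloud storage",
--         "dns tunnel large query encoded",
--     ],
--     'password spray': [
--         "4625 failed logon multiple accounts",
--         "4771 kerberos pre-authentication failure",
--         "bad password account lockout",
--         "authentication failure same source different users",
--     ],
--     'pass the hash': [
--         "4624 logon type 3 ntlm network",
--         "4648 explicit credentials runas",
--         "4672 special privileges admin logon",
--         "sekurlsa pth overpass the hash",
--     ],
-- }
--
-- def expand_to_multi_query(question: str) -> List[str]:
--     """Generate multiple query variations for the same question."""
--     queries = [question]
--     question_lower = question.lower()
--
--     for pattern, variations in MULTI_QUERY_TEMPLATES.items():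
--         if pattern in question_lower or any(word in question_lower for word in pattern.split()):
--             queries.extend(variations)
--
--     # Deduplicate while preserving order
--     seen = set()
--     unique = []
--     for q in queries:
--         if q.lower() not in seen:
--             seen.add(q.lower())
--             unique.append(q)
--
--     return unique[:7]  # Limit to 7 variations
-- ===== SOURCE B (Python) =====
-- from typing import List
--
-- MULTI_QUERY_TEMPLATES = {
--     'lateral movement': [
--         "remote logon type 3 type 10 network authentication",
--         "psexec wmic winrm remote execution admin$",
--         "4624 4648 network logon explicit credentials",
--         "rdp mstsc 3389 remote desktop connection",
--         "smb share access c$ admin$ ipc$",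
--     ],
--     'credential theft': [
--         "lsass mimikatz sekurlsa credential dump",
--         "procdump comsvcs minidump memory",
--         "sam ntds.dit registry hive export",
--         "kerberoast tgs ticket service principal",
--         "dcsync drsuapi replication domain controller",
--     ],
--     'malware execution': [
--         "powershell encodedcommand bypass hidden",
--         "certutil bitsadmin urlcache decode download",
--         "regsvr32 rundll32 mshta scrobj javascript",
--         "wmic process call create wmiprvse",
--         "cmd /c whoami net user systeminfo",
--     ],
--     'persistence': [
--         "schtasks scheduled task create 4698",
--         "service install sc create 7045",
--         "registry run key autorun startup",
--         "wmi subscription eventfilter consumer",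
--     ],
--     'exfiltration': [
--         "curl wget invoke-webrequest upload transfer",
--         "zip rar 7z archive compress staging",
--         "ftp sftp scp cloud storage",
--         "dns tunnel large query encoded",
--     ],
--     'password spray': [
--         "4625 failed logon multiple accounts",
--         "4771 kerberos pre-authentication failure",
--         "bad password account lockout",
--         "authentication failure same source different users",
--     ],
--     'pass the hash': [
--         "4624 logon type 3 ntlm network",
--         "4648 explicit credentials runas",
--         "4672 special privileges admin logon",
--         "sekurlsa pth overpass the hash",
--     ],
-- }
--
-- def expand_to_multi_query(question: str) -> List[str]:
--     """Generate multiple query variations for the same question."""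
--     question_lower = question.lower()
--     result = [question]
--     seen = {question_lower}
--     for pattern, variations in MULTI_QUERY_TEMPLATES.items():
--         if len(result) >= 7:
--             break
--         if pattern in question_lower or any(word in question_lower for word in pattern.split()):
--             for v in variations:
--                 if len(result) >= 7:
--                     break
--                 if v.lower() not in seen:
--                     seen.add(v.lower())
--                     result.append(v)
--     return result
-- ===== Notes on version B (the rewrite author's own statement) =====
-- stated objective: alternative
-- what changed: Replaces A's three phases (build full candidate list over all matched templates, then a separate dedup pass, then a [:7] slice) by one fused pass that seeds result/seen with the question, dedups while generating, and breaks out of both loops as soon as 7 items exist, so no intermediate list, no second pass and no slice.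
import Mathlib
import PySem

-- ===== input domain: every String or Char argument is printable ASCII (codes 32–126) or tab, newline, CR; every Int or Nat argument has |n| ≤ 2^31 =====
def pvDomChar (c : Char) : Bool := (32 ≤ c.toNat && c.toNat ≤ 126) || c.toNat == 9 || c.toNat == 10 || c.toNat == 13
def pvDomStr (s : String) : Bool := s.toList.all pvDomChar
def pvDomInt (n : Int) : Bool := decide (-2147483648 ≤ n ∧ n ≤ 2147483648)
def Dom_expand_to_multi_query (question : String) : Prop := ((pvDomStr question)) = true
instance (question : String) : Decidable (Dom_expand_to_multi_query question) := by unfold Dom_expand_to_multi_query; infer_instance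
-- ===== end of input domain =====

-- B fuses A's three phases (generate all matched variations, separate dedup pass, [:7] slice)
-- into one pass that dedups while generating and breaks out of both loops at 7 items (alternative decomposition).

-- module-level constant shared by both Pythons
def MULTI_QUERY_TEMPLATES : List (String × List String) := [
  ("lateral movement", [
    "remote logon type 3 type 10 network authentication",
    "psexec wmic winrm remote execution admin$",
    "4624 4648 network logon explicit credentials",
    "rdp mstsc 3389 remote desktop connection",
    "smb share access c$ admin$ ipc$"]),
  ("credential theft", [
    "lsass mimikatz sekurlsa credential dump",
    "procdump comsvcs minidump memory",
    "sam ntds.dit registry hive export",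
    "kerberoast tgs ticket service principal",
    "dcsync drsuapi replication domain controller"]),
  ("malware execution", [
    "powershell encodedcommand bypass hidden",
    "certutil bitsadmin urlcache decode download",
    "regsvr32 rundll32 mshta scrobj javascript",
    "wmic process call create wmiprvse",
    "cmd /c whoami net user systeminfo"]),
  ("persistence", [
    "schtasks scheduled task create 4698",
    "service install sc create 7045",
    "registry run key autorun startup",
    "wmi subscription eventfilter consumer"]),
  ("exfiltration", [
    "curl wget invoke-webrequest upload transfer",
    "zip rar 7z archive compress staging",
    "ftp sftp scp cloud storage",
    "dns tunnel large query encoded"]),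
  ("password spray", [
    "4625 failed logon multiple accounts",
    "4771 kerberos pre-authentication failure",
    "bad password account lockout",
    "authentication failure same source different users"]),
  ("pass the hash", [
    "4624 logon type 3 ntlm network",
    "4648 explicit credentials runas",
    "4672 special privileges admin logon",
    "sekurlsa pth overpass the hash"])]

-- ===== PORT A =====
-- 'pattern in question_lower or any(word in question_lower for word in pattern.split())'
def pvMatch (question_lower pattern : String) : Bool :=
  PySem.Str.isIn pattern question_lower ||
    (PySem.Str.split₀ pattern).any (fun word => PySem.Str.isIn word question_lower)

-- body of A's dedup loop: 'if q.lower() not in seen: seen.add(q.lower()); unique.append(q)'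
def pvDedupStep (su : PySem.Set String × List String) (q : String) : PySem.Set String × List String :=
  if su.1.contains (PySem.Str.lower q) then su
  else (su.1.add (PySem.Str.lower q), su.2 ++ [q])

def expand_to_multi_query (question : String) : List String :=
  let question_lower := PySem.Str.lower question
  let queries := MULTI_QUERY_TEMPLATES.foldl
    (fun queries pv => if pvMatch question_lower pv.1 then queries ++ pv.2 else queries)
    [question]
  let su := queries.foldl pvDedupStep ((PySem.Set.empty : PySem.Set String), ([] : List String))
  PySem.List.slice su.2 none (some 7)

-- ===== PORT B =====
-- inner 'for v in variations' loop with 'break' at 7 items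
def pvBInner (seen : PySem.Set String) (result : List String) (variations : List String) :
    PySem.Set String × List String :=
  match variations with
  | [] => (seen, result)
  | v :: rest =>
    if 7 ≤ result.length then (seen, result)
    else if seen.contains (PySem.Str.lower v) then pvBInner seen result rest
    else pvBInner (seen.add (PySem.Str.lower v)) (result ++ [v]) rest

-- outer 'for pattern, variations in MULTI_QUERY_TEMPLATES.items()' loop with 'break' at 7 items
def pvBOuter (question_lower : String) (seen : PySem.Set String) (result : List String)
    (ts : List (String × List String)) : List String :=
  match ts with
  | [] => result
  | (pattern, variations) :: rest =>
    if 7 ≤ result.length then result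
    else if PySem.Str.isIn pattern question_lower ||
        (PySem.Str.split₀ pattern).any (fun word => PySem.Str.isIn word question_lower) then
      pvBOuter question_lower (pvBInner seen result variations).1 (pvBInner seen result variations).2 rest
    else pvBOuter question_lower seen result rest

def expand_to_multi_query_alt (question : String) : List String :=
  let question_lower := PySem.Str.lower question
  pvBOuter question_lower (PySem.Set.ofList [question_lower]) [question] MULTI_QUERY_TEMPLATES

-- ===== PRECONDITION & SPEC =====
def Spec_expand_to_multi_query (question : String) (out : List String) : Prop := out = expand_to_multi_query_alt question
instance (question : String) (out : List String) : Decidable (Spec_expand_to_multi_query question out) := by unfold Spec_expand_to_multi_query; infer_instance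

-- ===== CLAIM (what is proved, stated in full; the proofs are below) =====
def Claim_equal_expand_to_multi_query : Prop := ∀ (question : String), Dom_expand_to_multi_query question → Spec_expand_to_multi_query question (expand_to_multi_query question)

-- ===== LEMMAS AND PROOFS =====

-- the dedup fold only appends to its list component, and its set component ignores the list
theorem pvDedup_shift (qs : List String) (s : PySem.Set String) (a b : List String) :
    qs.foldl pvDedupStep (s, a ++ b) =
      ((qs.foldl pvDedupStep (s, b)).1, a ++ (qs.foldl pvDedupStep (s, b)).2) := by
  induction qs generalizing s b with
  | nil => simp
  | cons q rest ih =>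
    simp only [List.foldl_cons, pvDedupStep]
    by_cases h : s.contains (PySem.Str.lower q) = true
    · rw [if_pos h, if_pos h]; exact ih s b
    · rw [if_neg h, if_neg h, List.append_assoc]; exact ih _ (b ++ [q])

-- whatever the initial state, the dedup fold's list extends the initial list
theorem pvDedup_prefix (qs : List String) (su : PySem.Set String × List String) :
    (qs.foldl pvDedupStep su).2 = su.2 ++ (qs.foldl pvDedupStep (su.1, [])).2 := by
  obtain ⟨s, a⟩ := su
  have := pvDedup_shift qs s a []
  simpa using congrArg Prod.snd this

-- B's inner loop vs A's dedup fold on the same variations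
theorem pvInner_eq (vs : List String) (s : PySem.Set String) (a : List String)
    (ha : a.length ≤ 7) :
    (pvBInner s a vs).2 = (vs.foldl pvDedupStep (s, a)).2.take 7 ∧
    (pvBInner s a vs).2.length ≤ 7 ∧
    ((pvBInner s a vs).2.length < 7 → pvBInner s a vs = vs.foldl pvDedupStep (s, a)) := by
  induction vs generalizing s a with
  | nil => simp [pvBInner, List.take_of_length_le ha, ha]
  | cons v rest ih =>
    by_cases h7 : 7 ≤ a.length
    · have ha7 : a.length = 7 := le_antisymm ha h7
      have hbi : pvBInner s a (v :: rest) = (s, a) := by simp [pvBInner, h7]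
      have hpre : (List.foldl pvDedupStep (s, a) (v :: rest)).2.take 7 = a := by
        rcases hps : pvDedupStep (s, a) v with ⟨s1, a1⟩
        have hs : a1 = a ∨ a1 = a ++ [v] := by
          simp only [pvDedupStep] at hps
          split_ifs at hps <;> rw [Prod.mk.injEq] at hps
          · exact Or.inl hps.2.symm
          · exact Or.inr hps.2.symm
        rw [List.foldl_cons, hps, pvDedup_prefix]
        rcases hs with h | h <;> subst h
        · rw [List.take_append_of_le_length (by omega), List.take_of_length_le ha]
        · rw [List.append_assoc, List.take_append_of_le_length (by omega),
            List.take_of_length_le ha]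
      refine ⟨by rw [hbi, hpre], by rw [hbi]; exact ha, ?_⟩
      intro hlt; rw [hbi] at hlt; simp at hlt; omega
    · simp only [pvBInner, if_neg h7, List.foldl_cons, pvDedupStep]
      by_cases hc : s.contains (PySem.Str.lower v) = true
      · rw [if_pos hc, if_pos hc]; exact ih s a ha
      · rw [if_neg hc, if_neg hc]
        exact ih _ _ (by simp; omega)

-- once the result has 7 items the outer loop returns it unchanged
theorem pvBOuter_full (ql : String) (ts : List (String × List String))
    (s : PySem.Set String) (a : List String) (h : 7 ≤ a.length) :
    pvBOuter ql s a ts = a := by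
  cases ts with
  | nil => rfl
  | cons t rest => obtain ⟨p, vs⟩ := t; simp [pvBOuter, h]

-- A's generation fold is a flatMap
theorem pvGen_eq (ql : String) (ts : List (String × List String)) (acc : List String) :
    ts.foldl (fun queries pv => if pvMatch ql pv.1 then queries ++ pv.2 else queries) acc =
      acc ++ ts.flatMap (fun pv => if pvMatch ql pv.1 then pv.2 else []) := by
  have h : (fun (queries : List String) (pv : String × List String) =>
      if pvMatch ql pv.1 then queries ++ pv.2 else queries) =
      (fun queries pv => queries ++ (if pvMatch ql pv.1 then pv.2 else [])) := by
    funext queries pv; split <;> simp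
  rw [h, PySem.List.foldl_append_eq_flatMap]

-- main correspondence: B's fused outer loop = A's dedup fold over the generated flatMap, cut at 7
theorem pvOuter_eq (ql : String) (ts : List (String × List String))
    (s : PySem.Set String) (a : List String) (ha : a.length ≤ 7) :
    pvBOuter ql s a ts =
      ((ts.flatMap (fun pv => if pvMatch ql pv.1 then pv.2 else [])).foldl
        pvDedupStep (s, a)).2.take 7 := by
  induction ts generalizing s a with
  | nil => simp [pvBOuter, List.take_of_length_le ha]
  | cons t rest ih =>
    obtain ⟨p, vs⟩ := t
    have hm : (PySem.Str.isIn p ql ||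
        (PySem.Str.split₀ p).any (fun word => PySem.Str.isIn word ql)) = pvMatch ql p := rfl
    simp only [pvBOuter, List.flatMap_cons, List.foldl_append]
    rw [hm]
    by_cases h7 : 7 ≤ a.length
    · rw [if_pos h7]
      rw [pvDedup_prefix _ (List.foldl pvDedupStep (s, a) _), pvDedup_prefix _ (s, a),
        List.append_assoc, List.take_append_of_le_length h7, List.take_of_length_le ha]
    · rw [if_neg h7]
      by_cases hmatch : pvMatch ql p = true
      · simp only [hmatch, if_true]
        obtain ⟨h1, h2, h3⟩ := pvInner_eq vs s a ha
        by_cases hfull : 7 ≤ (pvBInner s a vs).2.length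
        · rw [pvBOuter_full ql rest _ _ hfull]
          have hdlen : 7 ≤ (List.foldl pvDedupStep (s, a) vs).2.length := by
            have := congrArg List.length h1
            simp [List.length_take] at this
            omega
          rw [pvDedup_prefix _ (List.foldl pvDedupStep (s, a) vs),
            List.take_append_of_le_length hdlen]
          exact h1
        · have heq := h3 (by omega)
          rw [ih _ _ (by omega), heq]
      · simp only [hmatch, Bool.false_eq_true, if_false, List.foldl_nil]
        exact ih s a ha

-- ===== VERDICT (by name: the statement is the Claim_ definition above) =====
theorem expand_to_multi_query_spec : Claim_equal_expand_to_multi_query := by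
  intro question _
  unfold Spec_expand_to_multi_query
  simp only [expand_to_multi_query, expand_to_multi_query_alt]
  rw [pvGen_eq, pvOuter_eq _ _ _ _ (by simp)]
  rw [List.cons_append, List.nil_append, List.foldl_cons]
  have hstep : pvDedupStep ((PySem.Set.empty : PySem.Set String), ([] : List String)) question
      = (PySem.Set.ofList [PySem.Str.lower question], [question]) := rfl
  rw [hstep, PySem.List.slice_to]
  · rfl
  · norm_num
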